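-- pv_equiv track=rewrite | github.com/sumi-0011/algo | 백준/Silver/20546. 🐜 기적의 매매법 🐜/🐜 기적의 매매법 🐜.py | sung
-- ===== SOURCE A (Python) =====
-- def sung(m, arr):
--     down_cnt = 0
--     up_cnt = 0
--     money = m
--     purchase_cnt = 0
--     result = 0
--     for i in range(1, len(arr)):
--         if up_cnt >= 3:
--             price = arr[i - 1]
--             result += price * purchase_cnt
--             purchase_cnt = 0
--             money += price * purchase_cnt
--
--         if down_cnt >= 3:
--             price = arr[i - 1]
--             purchase_cnt += money // price
--             money = money % price
--
--         if arr[i - 1] < arr[i]:  # 증가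
--             up_cnt += 1
--             down_cnt = 0
--         elif arr[i - 1] > arr[i]:
--             down_cnt += 1
--             up_cnt = 0
--         else:
--             up_cnt = 0
--             down_cnt = 0
--
--     result += purchase_cnt * arr[-1]
--     return result + money
-- ===== SOURCE B (Python) =====
-- def sung(m, arr):
--     money, shares, sold = m, 0, 0
--     for i in range(4, len(arr)):
--         a, b, c, p = arr[i - 4], arr[i - 3], arr[i - 2], arr[i - 1]
--         if a < b < c < p:
--             sold += p * shares
--             shares = 0
--         elif a > b > c > p:
--             shares += money // p
--             money %= p
--     return sold + shares * arr[-1] + money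
-- ===== Notes on version B (the rewrite author's own statement) =====
-- stated objective: alternative
-- what changed: B drops A's mutable up/down streak counters and instead tests a stateless 4-element sliding window at each index (sell iff the last three moves were rises, buy iff the last three were falls), folding only (money, shares, sold) over indices 4..n-1.
import Mathlib
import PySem

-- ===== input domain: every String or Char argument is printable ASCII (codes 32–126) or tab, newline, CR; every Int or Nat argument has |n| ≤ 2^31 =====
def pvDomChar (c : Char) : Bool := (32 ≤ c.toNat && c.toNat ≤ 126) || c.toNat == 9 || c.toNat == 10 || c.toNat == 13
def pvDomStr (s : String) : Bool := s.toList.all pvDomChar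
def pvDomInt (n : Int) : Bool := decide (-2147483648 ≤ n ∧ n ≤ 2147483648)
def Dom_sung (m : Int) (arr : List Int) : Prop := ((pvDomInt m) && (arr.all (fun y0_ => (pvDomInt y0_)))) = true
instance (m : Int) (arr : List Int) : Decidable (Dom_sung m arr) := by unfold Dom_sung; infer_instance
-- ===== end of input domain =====

-- B replaces A's up/down streak counters by stateless 4-element window comparisons
-- (sell iff the last three moves were rises, buy iff the last three were falls):
-- an alternative decomposition of the same O(n) simulation; return value only, no mutation.

-- ===== PORT A =====
-- state = (down_cnt, up_cnt, money, purchase_cnt, result)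
def sungStep (arr : List Int) (st : Int × Int × Int × Int × Int) (i : Int) :
    Int × Int × Int × Int × Int :=
  let down_cnt := st.1; let up_cnt := st.2.1; let money := st.2.2.1
  let purchase_cnt := st.2.2.2.1; let result := st.2.2.2.2
  -- if up_cnt >= 3: sell
  let purchase_cnt' := if up_cnt ≥ 3 then (0 : Int) else purchase_cnt
  let result' := if up_cnt ≥ 3 then result + PySem.List.pyGetD arr (i - 1) 0 * purchase_cnt else result
  let money' := if up_cnt ≥ 3 then money + PySem.List.pyGetD arr (i - 1) 0 * purchase_cnt' else money
  -- if down_cnt >= 3: buy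
  let purchase_cnt'' := if down_cnt ≥ 3 then purchase_cnt' + PySem.Int.floordiv money' (PySem.List.pyGetD arr (i - 1) 0) else purchase_cnt'
  let money'' := if down_cnt ≥ 3 then PySem.Int.mod money' (PySem.List.pyGetD arr (i - 1) 0) else money'
  -- comparison of arr[i-1] with arr[i]
  if PySem.List.pyGetD arr (i - 1) 0 < PySem.List.pyGetD arr i 0 then
    (0, up_cnt + 1, money'', purchase_cnt'', result')
  else if PySem.List.pyGetD arr (i - 1) 0 > PySem.List.pyGetD arr i 0 then
    (down_cnt + 1, 0, money'', purchase_cnt'', result')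
  else
    (0, 0, money'', purchase_cnt'', result')

def sung (m : Int) (arr : List Int) : Int :=
  let st := (PySem.List.pyRange 1 (PySem.List.len arr) 1).foldl (sungStep arr) (0, 0, m, 0, 0)
  let result := st.2.2.2.2 + st.2.2.2.1 * PySem.List.pyGetD arr (-1) 0
  result + st.2.2.1

-- ===== PORT B =====
-- state = (money, shares, sold)
def sungAltStep (arr : List Int) (st : Int × Int × Int) (i : Int) : Int × Int × Int :=
  let a := PySem.List.pyGetD arr (i - 4) 0
  let b := PySem.List.pyGetD arr (i - 3) 0
  let c := PySem.List.pyGetD arr (i - 2) 0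
  let p := PySem.List.pyGetD arr (i - 1) 0
  if a < b ∧ b < c ∧ c < p then
    (st.1, 0, st.2.2 + p * st.2.1)
  else if a > b ∧ b > c ∧ c > p then
    (PySem.Int.mod st.1 p, st.2.1 + PySem.Int.floordiv st.1 p, st.2.2)
  else st

def sung_alt (m : Int) (arr : List Int) : Int :=
  let st := (PySem.List.pyRange 4 (PySem.List.len arr) 1).foldl (sungAltStep arr) (m, 0, 0)
  st.2.2 + st.2.1 * PySem.List.pyGetD arr (-1) 0 + st.1

-- ===== PRECONDITION & SPEC =====
-- Pre_ excludes exactly the inputs on which the Python A raises: the empty list (IndexError on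
-- arr[-1]) and lists where a buy signal fires at a zero price, i.e. three strictly falling steps
-- ending in the value 0 followed by one more element (ZeroDivisionError on money // price).
def Pre_sung (_m : Int) (arr : List Int) : Prop :=
  arr ≠ [] ∧ ∀ i ∈ List.range arr.length, 4 ≤ i →
    ¬(arr.getD (i - 4) 0 > arr.getD (i - 3) 0 ∧ arr.getD (i - 3) 0 > arr.getD (i - 2) 0 ∧
      arr.getD (i - 2) 0 > arr.getD (i - 1) 0 ∧ arr.getD (i - 1) 0 = 0)
instance (m : Int) (arr : List Int) : Decidable (Pre_sung m arr) := by unfold Pre_sung; infer_instance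

def pvWitness_sung : Int × List Int := (50, [1, 2, 3, 4, 2, 1, 5])

def Spec_sung (m : Int) (arr : List Int) (out : Int) : Prop := out = sung_alt m arr
instance (m : Int) (arr : List Int) (out : Int) : Decidable (Spec_sung m arr out) := by unfold Spec_sung; infer_instance

-- ===== CLAIM (what is proved, stated in full; the proofs are below) =====
def Claim_equal_sung : Prop := ∀ (m : Int) (arr : List Int), Dom_sung m arr → Pre_sung m arr → Spec_sung m arr (sung m arr)

-- ===== LEMMAS AND PROOFS =====

-- up-streak counter of A as a function of the step index: uRun arr t = up_cnt
-- after the comparison at step t has been processed (dRun likewise for down_cnt).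
def uRun (arr : List Int) : Nat → Int
  | 0 => 0
  | t + 1 => if arr.getD t 0 < arr.getD (t + 1) 0 then uRun arr t + 1 else 0

def dRun (arr : List Int) : Nat → Int
  | 0 => 0
  | t + 1 => if arr.getD t 0 > arr.getD (t + 1) 0 then dRun arr t + 1 else 0

theorem uRun_le (arr : List Int) (t : Nat) : uRun arr t ≤ (t : Int) := by
  induction t with
  | zero => simp [uRun]
  | succ t ih => simp only [uRun]; split <;> push_cast <;> omega

theorem dRun_le (arr : List Int) (t : Nat) : dRun arr t ≤ (t : Int) := by
  induction t with
  | zero => simp [dRun]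
  | succ t ih => simp only [dRun]; split <;> push_cast <;> omega

theorem uRun_nonneg (arr : List Int) (t : Nat) : 0 ≤ uRun arr t := by
  induction t with
  | zero => simp [uRun]
  | succ t ih => simp only [uRun]; split <;> omega

theorem dRun_nonneg (arr : List Int) (t : Nat) : 0 ≤ dRun arr t := by
  induction t with
  | zero => simp [dRun]
  | succ t ih => simp only [dRun]; split <;> omega

-- the streak counter reaches 3 exactly when the last three moves were rises (falls)
theorem uRun_ge3 (arr : List Int) (t : Nat) :
    uRun arr t ≥ 3 ↔ 3 ≤ t ∧ arr.getD (t - 3) 0 < arr.getD (t - 2) 0 ∧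
      arr.getD (t - 2) 0 < arr.getD (t - 1) 0 ∧ arr.getD (t - 1) 0 < arr.getD t 0 := by
  rcases t with _ | _ | _ | n
  · simp [uRun]
  · have h := uRun_le arr (0+1)
    constructor
    · intro hx; omega
    · rintro ⟨h3, _⟩; omega
  · have h := uRun_le arr (0+1+1)
    constructor
    · intro hx; omega
    · rintro ⟨h3, _⟩; omega
  · have h1 := uRun_nonneg arr n
    have e3 : n + 3 - 3 = n := by omega
    have e2 : n + 3 - 2 = n + 1 := by omega
    have e1 : n + 3 - 1 = n + 2 := by omega
    have en : n + 1 + 1 + 1 = n + 3 := by omega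
    rw [en]
    simp only [uRun, e3, e2, e1]
    simp only [show n + 2 + 1 = n + 3 from by omega, show n + 1 + 1 = n + 2 from by omega]
    split_ifs <;> omega

theorem dRun_ge3 (arr : List Int) (t : Nat) :
    dRun arr t ≥ 3 ↔ 3 ≤ t ∧ arr.getD (t - 3) 0 > arr.getD (t - 2) 0 ∧
      arr.getD (t - 2) 0 > arr.getD (t - 1) 0 ∧ arr.getD (t - 1) 0 > arr.getD t 0 := by
  rcases t with _ | _ | _ | n
  · simp [dRun]
  · have h := dRun_le arr (0+1)
    constructor
    · intro hx; omega
    · rintro ⟨h3, _⟩; omega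
  · have h := dRun_le arr (0+1+1)
    constructor
    · intro hx; omega
    · rintro ⟨h3, _⟩; omega
  · have h1 := dRun_nonneg arr n
    have e3 : n + 3 - 3 = n := by omega
    have e2 : n + 3 - 2 = n + 1 := by omega
    have e1 : n + 3 - 1 = n + 2 := by omega
    have en : n + 1 + 1 + 1 = n + 3 := by omega
    rw [en]
    simp only [dRun, e3, e2, e1]
    simp only [show n + 2 + 1 = n + 3 from by omega, show n + 1 + 1 = n + 2 from by omega]
    split_ifs <;> omega

-- loop correspondence: after processing i = 1 .. t, A's state carries the streak
-- counters and exactly B's (money, shares, sold) triple after its i = 4 .. t steps.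
theorem sung_inv (m : Int) (arr : List Int) (t : Nat) :
    (PySem.List.pyRange 1 ((t : Int) + 1) 1).foldl (sungStep arr) (0, 0, m, 0, 0) =
      (dRun arr t, uRun arr t,
        ((PySem.List.pyRange 4 ((t : Int) + 1) 1).foldl (sungAltStep arr) (m, 0, 0)).1,
        ((PySem.List.pyRange 4 ((t : Int) + 1) 1).foldl (sungAltStep arr) (m, 0, 0)).2.1,
        ((PySem.List.pyRange 4 ((t : Int) + 1) 1).foldl (sungAltStep arr) (m, 0, 0)).2.2) := by
  induction t with
  | zero =>
      rw [PySem.List.pyRange_one_eq_nil (by norm_num), PySem.List.pyRange_one_eq_nil (by norm_num)]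
      simp [uRun, dRun]
  | succ t ih =>
      have hcast : ((t + 1 : Nat) : Int) + 1 = ((t : Nat) : Int) + 1 + 1 := by push_cast; ring
      rw [hcast, PySem.List.pyRange_one_succ_right (by omega : (1 : Int) ≤ (t : Int) + 1),
        List.foldl_append, ih]
      simp only [List.foldl_cons, List.foldl_nil]
      by_cases ht : 3 ≤ t
      · rw [PySem.List.pyRange_one_succ_right (by omega : (4 : Int) ≤ (t : Int) + 1)]
        simp only [List.foldl_append, List.foldl_cons, List.foldl_nil]
        have hu := uRun_ge3 arr t
        have hd := dRun_ge3 arr t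
        have g0 : ((t : Int) + 1) = ((t + 1 : Nat) : Int) := by omega
        have h4 : (((t + 1 : Nat) : Int) - 4) = ((t - 3 : Nat) : Int) := by omega
        have h3 : (((t + 1 : Nat) : Int) - 3) = ((t - 2 : Nat) : Int) := by omega
        have h2 : (((t + 1 : Nat) : Int) - 2) = ((t - 1 : Nat) : Int) := by omega
        have h1 : (((t + 1 : Nat) : Int) - 1) = ((t : Nat) : Int) := by omega
        simp only [sungStep, sungAltStep, g0, h4, h3, h2, h1, PySem.List.pyGetD_natCast,
          uRun, dRun]
        by_cases hw : arr.getD (t - 3) 0 < arr.getD (t - 2) 0 ∧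
            arr.getD (t - 2) 0 < arr.getD (t - 1) 0 ∧ arr.getD (t - 1) 0 < arr.getD t 0
        · have hu3 : uRun arr t ≥ 3 := hu.mpr ⟨ht, hw⟩
          have hd3 : ¬ dRun arr t ≥ 3 := by
            intro h; have := (hd.mp h).2.2.2; omega
          simp only [if_pos hu3, if_neg hd3, if_pos hw]
          split_ifs <;> first | (exfalso; omega) | simp
        · have hu3 : ¬ uRun arr t ≥ 3 := by
            intro h; exact hw (hu.mp h).2
          simp only [if_neg hu3, if_neg hw]
          by_cases hw2 : arr.getD (t - 3) 0 > arr.getD (t - 2) 0 ∧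
              arr.getD (t - 2) 0 > arr.getD (t - 1) 0 ∧ arr.getD (t - 1) 0 > arr.getD t 0
          · have hd3 : dRun arr t ≥ 3 := hd.mpr ⟨ht, hw2⟩
            simp only [if_pos hd3, if_pos hw2]
            split_ifs <;> first | (exfalso; omega) | simp
          · have hd3 : ¬ dRun arr t ≥ 3 := by
              intro h; exact hw2 (hd.mp h).2
            simp only [if_neg hd3, if_neg hw2]
            split_ifs <;> first | (exfalso; omega) | simp
      · rw [PySem.List.pyRange_one_eq_nil (by omega : (t : Int) + 1 + 1 ≤ 4),
          PySem.List.pyRange_one_eq_nil (by omega : (t : Int) + 1 ≤ 4)]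
        have hu3 : ¬ uRun arr t ≥ 3 := by have := uRun_le arr t; omega
        have hd3 : ¬ dRun arr t ≥ 3 := by have := dRun_le arr t; omega
        have g0 : ((t : Int) + 1) = ((t + 1 : Nat) : Int) := by omega
        have h1 : (((t + 1 : Nat) : Int) - 1) = ((t : Nat) : Int) := by omega
        simp only [List.foldl_nil, sungStep, g0, h1, PySem.List.pyGetD_natCast, uRun, dRun,
          if_neg hu3, if_neg hd3]
        split_ifs <;> first | (exfalso; omega) | simp

-- ===== VERDICT (by name: the statement is the Claim_ definition above) =====
theorem sung_spec : Claim_equal_sung := by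
  unfold Claim_equal_sung Spec_sung
  intro m arr _ hpre
  obtain ⟨x, xs, rfl⟩ : ∃ x xs, arr = x :: xs := by
    cases arr with
    | nil => exact absurd rfl hpre.1
    | cons a l => exact ⟨a, l, rfl⟩
  have h := sung_inv m (x :: xs) xs.length
  have hl : PySem.List.len (x :: xs) = ((xs.length : Nat) : Int) + 1 := by
    simp [PySem.List.len]
  simp only [sung, sung_alt, hl]
  rw [h]
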